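-- pv_equiv track=rewrite | github.com/NgoQuocBao1010/Python | Project/Calculator/InfixToPostfix2.py | renew_string
-- ===== SOURCE A (Python) =====
-- def renew_string(sr):
-- 	new_sr = ''
-- 	stack = []
-- 	plus_minus = '+-'
--
-- 	for index in range(len(sr)):
-- 		if sr[index] not in plus_minus:
-- 			if len(stack) == 0:
-- 				new_sr += sr[index]
-- 			else:
-- 				a = stack.count('-')
-- 				if a % 2 == 0:
-- 					new_sr += '+'
-- 				else:
-- 					new_sr += '-'
-- 				new_sr += sr[index]
-- 			stack.clear()
-- 		else:
-- 			stack.append(sr[index])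
--
-- 	return new_sr
-- ===== SOURCE B (Python) =====
-- def renew_string(sr):
--     # Strip the trailing sign run (which A never flushes), then collapse each
--     # maximal run of '+'/'-' to one sign chosen by the parity of its '-' count.
--     sr = sr.rstrip('+-')
--     out = []
--     i = 0
--     n = len(sr)
--     while i < n:
--         if sr[i] in '+-':
--             j = i
--             while j < n and sr[j] in '+-':
--                 j += 1
--             out.append('-' if sr[i:j].count('-') % 2 else '+')
--             i = j
--         else:
--             out.append(sr[i])
--             i += 1
--     return ''.join(out)
-- ===== Notes on version B (the rewrite author's own statement) =====
-- stated objective: simpler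
-- what changed: Replaces A's per-character sign-stack accumulate-and-flush loop with a one-shot rstrip of the trailing sign run followed by a forward scan that collapses each maximal run of plus/minus characters to a single parity sign.
import Mathlib
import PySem

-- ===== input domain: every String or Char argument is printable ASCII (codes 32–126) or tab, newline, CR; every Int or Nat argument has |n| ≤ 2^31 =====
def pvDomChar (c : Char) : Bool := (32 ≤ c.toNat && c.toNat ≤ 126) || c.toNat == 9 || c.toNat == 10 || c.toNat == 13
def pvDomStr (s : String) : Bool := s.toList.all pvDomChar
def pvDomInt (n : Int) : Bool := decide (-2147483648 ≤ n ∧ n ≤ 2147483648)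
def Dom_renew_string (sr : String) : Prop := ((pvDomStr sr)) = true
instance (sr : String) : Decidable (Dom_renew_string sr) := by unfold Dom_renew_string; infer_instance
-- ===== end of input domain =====

-- B replaces A's accumulate-a-sign-stack-and-flush loop by: strip the trailing sign run
-- once, then collapse each maximal plus-minus run to one parity sign (objective: simpler).

def pvIsSign (c : Char) : Bool := c == '+' || c == '-'

-- ===== PORT A =====
-- one iteration of A's for-loop; state = (new_sr, stack), both as char lists
def renewStep (st : List Char × List Char) (c : Char) : List Char × List Char :=
  if ¬ (pvIsSign c = true) then
    if st.2.length = 0 then (st.1 ++ [c], [])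
    else (st.1 ++ [if st.2.count '-' % 2 = 0 then '+' else '-'] ++ [c], [])
  else (st.1, st.2 ++ [c])

def renew_string (sr : String) : String :=
  String.ofList ((sr.toList.foldl renewStep ([], [])).1)

-- ===== PORT B =====
-- sr.rstrip('+-')
def rstripSigns (l : List Char) : List Char := (l.reverse.dropWhile pvIsSign).reverse

-- B's outer while-loop: a run is extracted at once (takeWhile/dropWhile = the inner j-scan)
def collapseRuns : List Char → List Char
  | [] => []
  | c :: rest =>
    if pvIsSign c then
      (if (c :: rest.takeWhile pvIsSign).count '-' % 2 = 1 then '-' else '+')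
        :: collapseRuns (rest.dropWhile pvIsSign)
    else c :: collapseRuns rest
termination_by l => l.length
decreasing_by
  · exact Nat.lt_succ_of_le (List.length_dropWhile_le _ _)
  · simp

def renew_string_alt (sr : String) : String :=
  String.ofList (collapseRuns (rstripSigns sr.toList))

-- ===== PRECONDITION & SPEC =====
def Spec_renew_string (sr : String) (out : String) : Prop := out = renew_string_alt sr
instance (sr : String) (out : String) : Decidable (Spec_renew_string sr out) := by unfold Spec_renew_string; infer_instance

-- ===== CLAIM (what is proved, stated in full; the proofs are below) =====
def Claim_equal_renew_string : Prop := ∀ (sr : String), Dom_renew_string sr → Spec_renew_string sr (renew_string sr)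

-- ===== LEMMAS AND PROOFS =====

-- each step only appends to the accumulator's first component
theorem renewStep_append (acc st : List Char) (c : Char) :
    renewStep (acc, st) c = (acc ++ (renewStep ([], st) c).1, (renewStep ([], st) c).2) := by
  simp only [renewStep]
  split_ifs <;> simp

theorem foldl_fst_append (l : List Char) : ∀ acc st : List Char,
    (l.foldl renewStep (acc, st)).1 = acc ++ (l.foldl renewStep ([], st)).1 := by
  induction l with
  | nil => simp
  | cons c l ih =>
    intro acc st
    rw [List.foldl_cons, List.foldl_cons, renewStep_append]
    obtain ⟨b, st'⟩ := renewStep ([], st) c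
    rw [ih (acc ++ b) st', ih b st', List.append_assoc]

theorem takeWhile_signs_append (t : List Char) (c : Char) (rest : List Char)
    (ht : ∀ x ∈ t, pvIsSign x = true) (hc : ¬ pvIsSign c = true) :
    (t ++ c :: rest).takeWhile pvIsSign = t := by
  induction t with
  | nil => simp [hc]
  | cons a t ih =>
    have ha := ht a (by simp)
    simp only [List.cons_append, List.takeWhile_cons, ha, if_true]
    rw [ih (fun x hx => ht x (by simp [hx]))]

theorem dropWhile_signs_append (t : List Char) (c : Char) (rest : List Char)
    (ht : ∀ x ∈ t, pvIsSign x = true) (hc : ¬ pvIsSign c = true) :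
    (t ++ c :: rest).dropWhile pvIsSign = c :: rest := by
  induction t with
  | nil => simp [hc]
  | cons a t ih =>
    have ha := ht a (by simp)
    simp only [List.cons_append, List.dropWhile_cons, ha, if_true]
    exact ih (fun x hx => ht x (by simp [hx]))

-- collapsing a string whose prefix is an all-sign run followed by a non-sign char
theorem collapseRuns_signs_cons (st : List Char) (c : Char) (rest : List Char)
    (hst : ∀ x ∈ st, pvIsSign x = true) (hc : ¬ pvIsSign c = true) :
    collapseRuns (st ++ c :: rest)
      = (if st = [] then [] else [if st.count '-' % 2 = 1 then '-' else '+'])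
          ++ c :: collapseRuns rest := by
  cases st with
  | nil => simp [collapseRuns, hc]
  | cons s t =>
    have hs := hst s (by simp)
    have ht : ∀ x ∈ t, pvIsSign x = true := fun x hx => hst x (by simp [hx])
    rw [List.cons_append, collapseRuns, if_pos hs,
        takeWhile_signs_append t c rest ht hc, dropWhile_signs_append t c rest ht hc,
        collapseRuns, if_neg hc]
    simp

-- stripping a trailing sign run commutes with a non-sign char in the middle
theorem rstripSigns_append_cons (xs : List Char) (c : Char) (ys : List Char)
    (hc : ¬ pvIsSign c = true) :
    rstripSigns (xs ++ c :: ys) = xs ++ c :: rstripSigns ys := by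
  unfold rstripSigns
  rw [List.reverse_append, List.reverse_cons, List.append_assoc, List.dropWhile_append]
  by_cases h : ys.reverse.dropWhile pvIsSign = []
  · simp [h, hc]
  · simp only [h, List.isEmpty_iff]
    simp [List.reverse_append]

theorem rstripSigns_signs (st : List Char) (hst : ∀ x ∈ st, pvIsSign x = true) :
    rstripSigns st = [] := by
  unfold rstripSigns
  rw [List.dropWhile_eq_nil_iff.2 (fun x hx => hst x (by simpa using hx))]
  rfl

-- the parity-sign characters of the two ports coincide
theorem parity_sign_eq (a : Nat) :
    (if a % 2 = 0 then ('+' : Char) else '-') = (if a % 2 = 1 then '-' else '+') := by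
  rcases Nat.mod_two_eq_zero_or_one a with h | h <;> simp [h]

-- main invariant: running A's loop with pending sign stack st over l produces
-- B's answer on st ++ l
theorem main_invariant (l : List Char) : ∀ st : List Char,
    (∀ x ∈ st, pvIsSign x = true) →
    (l.foldl renewStep ([], st)).1 = collapseRuns (rstripSigns (st ++ l)) := by
  induction l with
  | nil =>
    intro st hst
    simp [rstripSigns_signs st hst, collapseRuns]
  | cons c l ih =>
    intro st hst
    by_cases hc : pvIsSign c = true
    · rw [List.foldl_cons, show renewStep ([], st) c = ([], st ++ [c]) from by
        simp [renewStep, hc]]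
      rw [ih (st ++ [c]) (by intro x hx; rcases List.mem_append.1 hx with h | h
                             · exact hst x h
                             · simp at h; simp [h, hc])]
      rw [List.append_assoc]; rfl
    · rw [List.foldl_cons, rstripSigns_append_cons st c l hc,
          collapseRuns_signs_cons st c (rstripSigns l) hst hc]
      by_cases h0 : st = []
      · rw [show renewStep ([], st) c = ([c], []) from by simp [renewStep, hc, h0],
            foldl_fst_append, ih [] (by simp), if_pos h0]
        simp
      · rw [show renewStep ([], st) c = ([if st.count '-' % 2 = 0 then '+' else '-', c], [])
              from by simp [renewStep, hc, List.length_eq_zero_iff, h0],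
            foldl_fst_append, ih [] (by simp), if_neg h0, parity_sign_eq]
        simp

-- ===== VERDICT (by name: the statement is the Claim_ definition above) =====
theorem renew_string_spec : Claim_equal_renew_string := by
  intro sr _
  show _ = _
  unfold renew_string renew_string_alt
  rw [main_invariant sr.toList [] (by simp), List.nil_append]
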